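-- pv_equiv track=rewrite | github.com/ratataque/advent_of_code_25 | day_6/main.py | part1
-- ===== SOURCE A (Python) =====
-- def part1(data):
--     data = [line.split() for line in data.split("\n")]
--
--     table = list(zip(*data))
--
--     result = 0
--     for col in table:
--         total = int(col[0])
--         if col[-1] == "*":
--             for num in col[1:-1]:
--                 total *= int(num)
--         else:
--             for num in col[1:-1]:
--                 total += int(num)
--
--         result += total
--
--     return result
-- ===== SOURCE B (Python) =====
-- def part1(data):
--     rows = [line.split() for line in data.split("\n")]
--     ncols = min(len(r) for r in rows)
--     prod = [int(t) for t in rows[0][:ncols]]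
--     summ = prod[:]
--     for row in rows[1:-1]:
--         vals = [int(t) for t in row[:ncols]]
--         prod = [p * v for p, v in zip(prod, vals)]
--         summ = [s + v for s, v in zip(summ, vals)]
--     return sum(p if op == "*" else s
--                for (p, s), op in zip(zip(prod, summ), rows[-1]))
-- ===== Notes on version B (the rewrite author's own statement) =====
-- stated objective: alternative
-- what changed: B never transposes: it keeps per-column running product and sum arrays and scans the grid row-major in one pass, picking product or sum per column from the operator row at the end, instead of A's zip-transpose with a separate inner loop over each column.
import Mathlib
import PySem

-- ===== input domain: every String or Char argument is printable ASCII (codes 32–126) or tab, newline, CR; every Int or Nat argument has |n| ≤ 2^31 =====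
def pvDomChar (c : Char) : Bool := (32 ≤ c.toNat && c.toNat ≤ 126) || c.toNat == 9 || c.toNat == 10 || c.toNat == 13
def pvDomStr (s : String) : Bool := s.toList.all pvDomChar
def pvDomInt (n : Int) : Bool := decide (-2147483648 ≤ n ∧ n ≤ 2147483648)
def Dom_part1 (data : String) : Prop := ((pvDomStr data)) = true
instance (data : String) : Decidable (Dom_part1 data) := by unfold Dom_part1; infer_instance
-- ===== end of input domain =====

-- B is an ALTERNATIVE decomposition of the same O(R*C) task: no transpose, one row-major pass
-- maintaining per-column product/sum arrays; the proven equivalence is about return values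
-- (neither program mutates its argument).

-- int(s); Pre_part1 guarantees ofStr? succeeds wherever either Python calls int()
def pyint (s : String) : Int := (PySem.Int.ofStr? s).getD 0

-- min(len(r) for r in rows); also the truncation length of zip(*rows) (0 when rows = [])
def minLen (rows : List (List String)) : Nat :=
  ((PySem.List.min? (rows.map fun r => (r.length : Int)) (fun x => x)).getD 0).toNat

-- ===== PORT A =====
-- zip(*rows) is encoded exactly: the j-th token of every row, for j below the shortest row length
def part1 (data : String) : Int :=
  let rows := ((PySem.Str.split? data "\n").getD []).map PySem.Str.split₀
  let table := (List.range (minLen rows)).map (fun j => rows.map (fun r => r.getD j ""))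
  table.foldl (fun result col =>
    let total := pyint ((PySem.List.pyGet? col 0).getD "")
    let total :=
      if (PySem.List.pyGet? col (-1)).getD "" == "*" then
        (PySem.List.slice col (some 1) (some (-1))).foldl (fun t s => t * pyint s) total
      else
        (PySem.List.slice col (some 1) (some (-1))).foldl (fun t s => t + pyint s) total
    result + total) 0

-- ===== PORT B =====
def part1_alt (data : String) : Int :=
  let rows := ((PySem.Str.split? data "\n").getD []).map PySem.Str.split₀
  let ncols := minLen rows
  let prod0 := (PySem.List.slice ((PySem.List.pyGet? rows 0).getD []) none (some (ncols : Int))).map pyint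
  let ps := (PySem.List.slice rows (some 1) (some (-1))).foldl
      (fun (ps : List Int × List Int) row =>
        let vals := (PySem.List.slice row none (some (ncols : Int))).map pyint
        (List.zipWith (· * ·) ps.1 vals, List.zipWith (· + ·) ps.2 vals))
      (prod0, prod0)
  (((ps.1.zip ps.2).zip ((PySem.List.pyGet? rows (-1)).getD [])).map
      (fun x => if x.2 == "*" then x.1.1 else x.1.2)).sum

-- ===== PRECONDITION & SPEC =====
-- the tokenized grid, shared by the precondition (not by the ports' definitions beyond transliteration)
def pvRowsOf (data : String) : List (List String) :=
  ((PySem.Str.split? data "\n").getD []).map PySem.Str.split₀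

-- Pre_part1 excludes exactly the inputs where Python's int() raises ValueError in A (on a
-- first-row token or a middle-row token of some kept column); A returns on all other inputs.
def Pre_part1 (data : String) : Prop :=
  ∀ j < minLen (pvRowsOf data),
    ((PySem.Int.ofStr? (((pvRowsOf data).headD []).getD j "")).isSome = true) ∧
    ∀ r ∈ ((pvRowsOf data).drop 1).dropLast,
      (PySem.Int.ofStr? (r.getD j "")).isSome = true
instance (data : String) : Decidable (Pre_part1 data) := by unfold Pre_part1; infer_instance

def pvWitness_part1 : String := "1 2\n3 4\n* +"

def Spec_part1 (data : String) (out : Int) : Prop := out = part1_alt data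
instance (data : String) (out : Int) : Decidable (Spec_part1 data out) := by unfold Spec_part1; infer_instance

-- ===== CLAIM (what is proved, stated in full; the proofs are below) =====
def Claim_equal_part1 : Prop := ∀ (data : String), Dom_part1 data → Pre_part1 data → Spec_part1 data (part1 data)

-- ===== LEMMAS AND PROOFS =====

def colTotal (col : List String) : Int :=
  let total := pyint ((PySem.List.pyGet? col 0).getD "")
  if (PySem.List.pyGet? col (-1)).getD "" == "*" then
    (PySem.List.slice col (some 1) (some (-1))).foldl (fun t s => t * pyint s) total
  else
    (PySem.List.slice col (some 1) (some (-1))).foldl (fun t s => t + pyint s) total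

def AC (rows : List (List String)) : Int :=
  ((List.range (minLen rows)).map (fun j => rows.map (fun r => r.getD j ""))).foldl
    (fun result col => result + colTotal col) 0

def stepB (n : Nat) (ps : List Int × List Int) (row : List String) : List Int × List Int :=
  let vals := (PySem.List.slice row none (some (n : Int))).map pyint
  (List.zipWith (· * ·) ps.1 vals, List.zipWith (· + ·) ps.2 vals)

def BC (rows : List (List String)) : Int :=
  let ncols := minLen rows
  let prod0 := (PySem.List.slice ((PySem.List.pyGet? rows 0).getD []) none (some (ncols : Int))).map pyint
  let ps := (PySem.List.slice rows (some 1) (some (-1))).foldl (stepB ncols) (prod0, prod0)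
  (((ps.1.zip ps.2).zip ((PySem.List.pyGet? rows (-1)).getD [])).map
      (fun x => if x.2 == "*" then x.1.1 else x.1.2)).sum

theorem minLen_le (rows : List (List String)) (r : List String) (h : r ∈ rows) :
    minLen rows ≤ r.length := by
  unfold minLen
  have hne : rows.map (fun r => (r.length : Int)) ≠ [] := by
    simp; rintro rfl; simp at h
  rcases hmm : PySem.List.min? (rows.map fun r => (r.length : Int)) (fun x => x) with _ | m
  · exact absurd ((PySem.List.min?_eq_none_iff _ _).1 hmm) hne
  have hmin := PySem.List.min?_isMin hmm ((r.length : Int)) (by simp; exact ⟨r, h, rfl⟩)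
  rw [hmm]
  simp at hmin ⊢
  omega

theorem slice_one_negone {α : Type} (xs : List α) :
    PySem.List.slice xs (some 1) (some (-1)) = xs.tail.dropLast := by
  cases xs with
  | nil => rfl
  | cons a l =>
    simp [PySem.List.slice, PySem.List.clampIdx, List.dropLast_eq_take]
    split <;> omega

theorem foldl_add_map {α : Type} (xs : List α) (g : α → Int) (a : Int) :
    xs.foldl (fun r x => r + g x) a = a + (xs.map g).sum := by
  induction xs generalizing a with
  | nil => simp
  | cons x t ih => simp [List.foldl_cons, ih]; ring

theorem foldB (n : Nat) (mid : List (List String)) (p s : List Int)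
    (hp : p.length = n) (hs : s.length = n) (hm : ∀ r ∈ mid, n ≤ r.length) :
    (mid.foldl (stepB n) (p, s)).1.length = n ∧ (mid.foldl (stepB n) (p, s)).2.length = n ∧
    ∀ j, j < n →
      (mid.foldl (stepB n) (p, s)).1.getD j 0
        = mid.foldl (fun t r => t * pyint (r.getD j "")) (p.getD j 0) ∧
      (mid.foldl (stepB n) (p, s)).2.getD j 0
        = mid.foldl (fun t r => t + pyint (r.getD j "")) (s.getD j 0) := by
  induction mid generalizing p s with
  | nil => exact ⟨hp, hs, fun j hj => ⟨rfl, rfl⟩⟩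
  | cons r mid ih =>
    have hr : n ≤ r.length := hm r (by simp)
    have hvals : ((PySem.List.slice r none (some (n : Int))).map pyint).length = n := by
      rw [PySem.List.slice_to_natCast]; simp; omega
    set vals := (PySem.List.slice r none (some (n : Int))).map pyint with hv
    have hstep : stepB n (p, s) r = (List.zipWith (· * ·) p vals, List.zipWith (· + ·) s vals) := rfl
    have hlp : (List.zipWith (· * ·) p vals).length = n := by simp [hp, hvals]
    have hls : (List.zipWith (· + ·) s vals).length = n := by simp [hs, hvals]
    have hgv : ∀ j, j < n → vals.getD j 0 = pyint (r.getD j "") := by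
      intro j hj
      rw [hv, PySem.List.slice_to_natCast]
      rw [List.getD_eq_getElem _ _ (by simp; omega)]
      rw [List.getD_eq_getElem _ _ (by omega)]
      simp
    have hgp : ∀ j, j < n → (List.zipWith (· * ·) p vals).getD j 0 = p.getD j 0 * pyint (r.getD j "") := by
      intro j hj
      rw [List.getD_eq_getElem _ _ (by omega), List.getD_eq_getElem _ _ (by omega)]
      rw [List.getElem_zipWith]
      rw [← hgv j hj, List.getD_eq_getElem _ _ (by omega)]
    have hgs : ∀ j, j < n → (List.zipWith (· + ·) s vals).getD j 0 = s.getD j 0 + pyint (r.getD j "") := by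
      intro j hj
      rw [List.getD_eq_getElem _ _ (by omega), List.getD_eq_getElem _ _ (by omega)]
      rw [List.getElem_zipWith]
      rw [← hgv j hj, List.getD_eq_getElem _ _ (by omega)]
    rw [List.foldl_cons, hstep]
    obtain ⟨l1, l2, hind⟩ := ih (List.zipWith (· * ·) p vals) (List.zipWith (· + ·) s vals)
      hlp hls (fun x hx => hm x (by simp [hx]))
    refine ⟨l1, l2, fun j hj => ?_⟩
    obtain ⟨e1, e2⟩ := hind j hj
    rw [List.foldl_cons, List.foldl_cons]
    exact ⟨by rw [e1, hgp j hj], by rw [e2, hgs j hj]⟩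

theorem main_eq (rows : List (List String)) : AC rows = BC rows := by
  rcases rows with _ | ⟨first, rest⟩
  · rfl
  rcases List.eq_nil_or_concat rest with rfl | ⟨mid, last, rfl⟩
  · -- single row
    set n := minLen [first] with hn
    have hfirst : n ≤ first.length := minLen_le _ first (by simp)
    unfold AC BC
    rw [← hn]
    rw [foldl_add_map, zero_add, List.map_map]
    have hcol : ∀ j ∈ List.range n,
        (colTotal ∘ fun j => [first].map (fun r => r.getD j "")) j = pyint (first.getD j "") := by
      intro j hj
      simp only [Function.comp, List.map_cons, List.map_nil]
      unfold colTotal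
      rw [slice_one_negone]
      simp
    rw [List.map_congr_left hcol]
    -- B side
    simp only [PySem.List.pyGet?_zero_cons, Option.getD_some, slice_one_negone,
      PySem.List.pyGet?_neg_one]
    simp only [List.tail_cons, List.dropLast_nil, List.foldl_nil, List.getLast?_singleton,
      Option.getD_some, PySem.List.slice_to_natCast]
    congr 1
    apply List.ext_getElem
    · simp; omega
    · intro j h1 h2
      simp only [List.length_map, List.length_range] at h1
      simp only [List.getElem_map, List.getElem_zip, List.getElem_range, ite_self,
        List.getElem_take]
      rw [List.getD_eq_getElem _ _ (by omega)]
  · -- rows = first :: mid ++ [last]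
    rw [List.concat_eq_append]
    set rows := first :: (mid ++ [last]) with hrows
    set n := minLen rows with hn
    have hfirst : n ≤ first.length := minLen_le _ first (by simp [hrows])
    have hlast : n ≤ last.length := minLen_le _ last (by simp [hrows])
    have hmid : ∀ r ∈ mid, n ≤ r.length := fun r hr => minLen_le _ r (by simp [hrows, hr])
    unfold AC BC
    rw [← hn, foldl_add_map, zero_add, List.map_map]
    have hcolfn : ∀ j ∈ List.range n, (colTotal ∘ fun j => rows.map (fun r => r.getD j "")) j
        = (fun j => if last.getD j "" == "*" then
              mid.foldl (fun t r => t * pyint (r.getD j "")) (pyint (first.getD j ""))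
            else
              mid.foldl (fun t r => t + pyint (r.getD j "")) (pyint (first.getD j ""))) j := by
      intro j hj
      simp only [Function.comp_apply, hrows, List.map_cons, List.map_append, List.map_nil]
      unfold colTotal
      rw [slice_one_negone]
      rw [← List.cons_append, PySem.List.pyGet?_neg_one_append_singleton]
      rw [List.cons_append, PySem.List.pyGet?_zero_cons]
      simp only [Option.getD_some, List.tail_cons, List.dropLast_concat]
      rw [List.foldl_map, List.foldl_map]
    rw [List.map_congr_left hcolfn]
    -- B side
    have h0 : PySem.List.pyGet? rows 0 = some first := by rw [hrows]; exact PySem.List.pyGet?_zero_cons _ _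
    have hneg : PySem.List.pyGet? rows (-1) = some last := by
      rw [hrows, ← List.cons_append]; exact PySem.List.pyGet?_neg_one_append_singleton _ _
    have hsl : PySem.List.slice rows (some 1) (some (-1)) = mid := by
      rw [slice_one_negone, hrows, List.tail_cons, List.dropLast_concat]
    rw [h0, hneg, hsl]
    simp only [Option.getD_some, PySem.List.slice_to_natCast]
    set p0 := (List.take n first).map pyint with hp0
    have hp0len : p0.length = n := by simp [hp0]; omega
    have hp0get : ∀ j, j < n → p0.getD j 0 = pyint (first.getD j "") := by
      intro j hj
      rw [List.getD_eq_getElem _ _ (by simp [hp0]; omega), List.getD_eq_getElem _ _ (by omega)]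
      simp [hp0]
    obtain ⟨l1, l2, hget⟩ := foldB n mid p0 p0 hp0len hp0len hmid
    congr 1
    apply List.ext_getElem
    · simp [l1, l2]; omega
    · intro j h1 h2
      simp only [List.length_map, List.length_range] at h1
      simp only [List.getElem_map, List.getElem_zip, List.getElem_range]
      obtain ⟨e1, e2⟩ := hget j h1
      rw [← List.getD_eq_getElem ((List.foldl (stepB n) (p0, p0) mid).1) 0 (by omega),
        ← List.getD_eq_getElem ((List.foldl (stepB n) (p0, p0) mid).2) 0 (by omega),
        e1, e2, hp0get j h1,
        ← List.getD_eq_getElem last "" (by omega)]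

theorem part1_eq_AC (data : String) : part1 data = AC (pvRowsOf data) := rfl

theorem part1_alt_eq_BC (data : String) : part1_alt data = BC (pvRowsOf data) := rfl

-- ===== VERDICT (by name: the statement is the Claim_ definition above) =====
theorem part1_spec : Claim_equal_part1 := by
  intro data _ _
  unfold Spec_part1
  rw [part1_eq_AC, part1_alt_eq_BC, main_eq]
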